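-- pv_equiv track=rewrite | github.com/myegorov/ip-filter | prototype/ipfilter.py | _choose_hash_funcs
-- ===== SOURCE A (Python) =====
-- def _choose_hash_funcs(start, end=None, pattern=None):
--     '''Generate and return a list/generator of hash functions to use,
--         e.g. [0,1,2,3] if `start`==0, `end`==4. Or encode `patter` as
--         a bitstring (e.g. [7] for `start`==5, `pattern`==4, encoding "100")
--
--         Range is exclusive of `end`.
--     '''
--     if pattern is None:
--         return range(start, end, 1)
--     res = []
--     count = 0
--     while pattern:
--         if pattern & 1:
--             res.append(start+count)
--         count += 1
--         pattern >>= 1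
--     return res
-- ===== SOURCE B (Python) =====
-- def _choose_hash_funcs(start, end=None, pattern=None):
--     if pattern is None:
--         return range(start, end, 1)
--     res = []
--     while pattern:
--         top = pattern.bit_length() - 1
--         res.append(start + top)
--         pattern -= 1 << top
--     return res[::-1]
-- ===== Notes on version B (the rewrite author's own statement) =====
-- stated objective: alternative
-- what changed: B extracts set-bit positions greedily from the MOST significant bit down, repeatedly taking bit_length()-1 and subtracting that power of two, then reverses the descending list; A scans LSB-first with a shift-and-test loop over every bit.
import Mathlib
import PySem

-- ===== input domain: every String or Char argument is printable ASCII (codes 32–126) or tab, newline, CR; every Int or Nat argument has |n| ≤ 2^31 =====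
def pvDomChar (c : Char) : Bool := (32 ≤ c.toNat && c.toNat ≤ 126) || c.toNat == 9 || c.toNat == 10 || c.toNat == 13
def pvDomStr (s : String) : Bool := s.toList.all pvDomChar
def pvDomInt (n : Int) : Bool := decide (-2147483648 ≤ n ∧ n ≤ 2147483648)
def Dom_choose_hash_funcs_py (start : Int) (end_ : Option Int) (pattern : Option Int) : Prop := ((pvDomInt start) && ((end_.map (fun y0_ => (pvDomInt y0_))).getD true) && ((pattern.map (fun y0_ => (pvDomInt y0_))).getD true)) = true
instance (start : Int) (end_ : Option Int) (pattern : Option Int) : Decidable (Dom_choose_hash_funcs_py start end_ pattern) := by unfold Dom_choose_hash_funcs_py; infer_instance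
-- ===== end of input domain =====

-- B replaces A's LSB-first shift-and-test scan by a greedy MSB-first loop: repeatedly take
-- the top set bit via bit_length()-1, subtract that power of two, then reverse the list.

-- ===== PORT A =====
-- A's while loop: pattern is nonnegative inside Pre_, so the loop variable is a Nat.
def chooseLoopA (start : Int) : Nat → Int → List Int → List Int
  | 0, _, res => res
  | p + 1, count, res =>
      chooseLoopA start ((p + 1) / 2) (count + 1)
        (if (p + 1) % 2 = 1 then res ++ [start + count] else res)
  decreasing_by exact Nat.div_lt_self (Nat.succ_pos p) (by norm_num)

def choose_hash_funcs_py (start : Int) (end_ : Option Int) (pattern : Option Int) : List Int :=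
  match pattern with
  | none =>
    match end_ with
    | some e => PySem.List.pyRange start e 1
    | none => []          -- Python raises TypeError here; excluded by Pre_
  | some p => chooseLoopA start p.toNat 0 []

-- ===== PORT B =====
-- Python int.bit_length for nonnegative n.
def bitLen : Nat → Nat
  | 0 => 0
  | n + 1 => bitLen ((n + 1) / 2) + 1
  decreasing_by exact Nat.div_lt_self (Nat.succ_pos n) (by norm_num)

-- B's while loop: top = bit_length()-1; append start+top; pattern -= 1 << top (exact: 2^top).
def chooseLoopB (start : Int) (p : Nat) (res : List Int) : List Int :=
  if p = 0 then res
  else chooseLoopB start (p - 2 ^ (bitLen p - 1)) (res ++ [start + ((bitLen p - 1 : Nat) : Int)])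
  termination_by p
  decreasing_by exact Nat.sub_lt (Nat.pos_of_ne_zero (by assumption)) (Nat.two_pow_pos _)

def choose_hash_funcs_py_alt (start : Int) (end_ : Option Int) (pattern : Option Int) : List Int :=
  match pattern with
  | none =>
    match end_ with
    | some e => PySem.List.pyRange start e 1
    | none => []          -- Python raises TypeError here; excluded by Pre_
  | some p => (chooseLoopB start p.toNat []).reverse   -- res[::-1]

-- ===== PRECONDITION & SPEC =====
-- Pre_ excludes (i) pattern=None with end=None, where Python A raises TypeError, and
-- (ii) negative pattern, where A's while loop never terminates (pattern >>= 1 stalls at -1).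
def Pre_choose_hash_funcs_py (start : Int) (end_ : Option Int) (pattern : Option Int) : Prop :=
  (pattern = none → end_ ≠ none) ∧ (∀ p : Int, pattern = some p → 0 ≤ p)
instance (start : Int) (end_ : Option Int) (pattern : Option Int) : Decidable (Pre_choose_hash_funcs_py start end_ pattern) := by unfold Pre_choose_hash_funcs_py; infer_instance

def pvWitness_choose_hash_funcs_py : Int × Option Int × Option Int := (5, none, some 4)

def Spec_choose_hash_funcs_py (start : Int) (end_ : Option Int) (pattern : Option Int) (out : List Int) : Prop := out = choose_hash_funcs_py_alt start end_ pattern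
instance (start : Int) (end_ : Option Int) (pattern : Option Int) (out : List Int) : Decidable (Spec_choose_hash_funcs_py start end_ pattern out) := by unfold Spec_choose_hash_funcs_py; infer_instance

-- ===== CLAIM (what is proved, stated in full; the proofs are below) =====
def Claim_equal_choose_hash_funcs_py : Prop := ∀ (start : Int) (end_ : Option Int) (pattern : Option Int), Dom_choose_hash_funcs_py start end_ pattern → Pre_choose_hash_funcs_py start end_ pattern → Spec_choose_hash_funcs_py start end_ pattern (choose_hash_funcs_py start end_ pattern)

-- ===== LEMMAS AND PROOFS =====

-- LSB-first bit positions of p, offset by start + k: the shape of A's loop.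
def collect (start : Int) : Nat → Nat → List Int
  | 0, _ => []
  | p + 1, k =>
      (if (p + 1) % 2 = 1 then [start + (k : Int)] else []) ++
        collect start ((p + 1) / 2) (k + 1)
  decreasing_by exact Nat.div_lt_self (Nat.succ_pos p) (by norm_num)

theorem chooseLoopA_eq (start : Int) :
    ∀ (p k : Nat) (res : List Int), chooseLoopA start p (k : Int) res = res ++ collect start p k := by
  intro p
  induction p using Nat.strong_induction_on with
  | _ p ih =>
    intro k res
    match p with
    | 0 => simp [chooseLoopA, collect]
    | q + 1 =>
      rw [chooseLoopA, collect]
      have h := ih ((q + 1) / 2) (Nat.div_lt_self (Nat.succ_pos q) (by norm_num)) (k + 1)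
      push_cast at h
      rw [h]
      split <;> simp

theorem collect_pos (start : Int) (p k : Nat) (hp : 0 < p) :
    collect start p k =
      (if p % 2 = 1 then [start + (k : Int)] else []) ++ collect start (p / 2) (k + 1) := by
  match p, hp with
  | q + 1, _ => rw [collect]

theorem bitLen_pos (p : Nat) (hp : 0 < p) : bitLen p = bitLen (p / 2) + 1 := by
  match p, hp with
  | q + 1, _ => rw [bitLen]

theorem pow_bitLen_le : ∀ p : Nat, 0 < p → 2 ^ (bitLen p - 1) ≤ p := by
  intro p
  induction p using Nat.strong_induction_on with
  | _ p ih =>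
    intro hp
    rw [bitLen_pos p hp]
    simp only [Nat.add_sub_cancel]
    by_cases h2 : p / 2 = 0
    · simp [h2, bitLen]
      omega
    · have hq : 0 < p / 2 := Nat.pos_of_ne_zero h2
      have := ih (p / 2) (Nat.div_lt_self hp (by norm_num)) hq
      have hb : 1 ≤ bitLen (p / 2) := by rw [bitLen_pos _ hq]; omega
      have : 2 ^ (bitLen (p / 2)) ≤ 2 * (p / 2) := by
        calc 2 ^ (bitLen (p / 2)) = 2 * 2 ^ (bitLen (p / 2) - 1) := by
              rw [← pow_succ']; congr 1; omega
          _ ≤ 2 * (p / 2) := by omega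
      omega

-- shifting the offset k into start
theorem collect_shift (start : Int) :
    ∀ (p k : Nat), collect start p (k + 1) = collect (start + 1) p k := by
  intro p
  induction p using Nat.strong_induction_on with
  | _ p ih =>
    intro k
    match p with
    | 0 => rw [collect, collect]
    | q + 1 =>
      rw [collect, collect]
      rw [ih ((q + 1) / 2) (Nat.div_lt_self (Nat.succ_pos q) (by norm_num)) (k + 1)]
      have : start + ((k : Int) + 1) = start + 1 + (k : Int) := by ring
      push_cast
      rw [this]

-- splitting off the TOP set bit: the key bridge between A's LSB scan and B's MSB greedy loop
theorem collect_split (start : Int) :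
    ∀ p : Nat, 0 < p →
      collect start p 0 =
        collect start (p - 2 ^ (bitLen p - 1)) 0 ++ [start + ((bitLen p - 1 : Nat) : Int)] := by
  intro p
  induction p using Nat.strong_induction_on generalizing start with
  | _ p ih =>
    intro hp
    have hq2 : p / 2 < p := Nat.div_lt_self hp (by norm_num)
    by_cases h2 : p / 2 = 0
    · -- p = 1
      have hp1 : p = 1 := by omega
      subst hp1
      simp [collect, bitLen]
    · have hq : 0 < p / 2 := Nat.pos_of_ne_zero h2
      have hble : 2 ^ (bitLen (p / 2) - 1) ≤ p / 2 := pow_bitLen_le _ hq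
      have hb1 : 1 ≤ bitLen (p / 2) := by rw [bitLen_pos _ hq]; omega
      have ihq := ih (p / 2) hq2 (start := start + 1) hq
      have hBL : bitLen p - 1 = bitLen (p / 2) := by rw [bitLen_pos p hp]; omega
      -- p' = p - 2^(bitLen p - 1); relate p' / 2 and p' % 2 to (p/2)'
      set m := bitLen (p / 2) with hm
      have hpow : 2 ^ m = 2 * 2 ^ (m - 1) := by rw [← pow_succ']; congr 1; omega
      have hp' : p - 2 ^ (bitLen p - 1) = p - 2 ^ m := by rw [hBL]
      have hle : 2 ^ m ≤ p := by
        have := Nat.div_mul_le_self p 2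
        omega
      have hdiv : (p - 2 ^ m) / 2 = p / 2 - 2 ^ (m - 1) := by omega
      have hmod : (p - 2 ^ m) % 2 = p % 2 := by omega
      rw [hp']
      rw [collect_pos start p 0 hp]
      by_cases hz : p - 2 ^ m = 0
      · -- p' = 0: then p/2 = 2^(m-1) and p%2 = 0? not necessarily: p = 2^m so p%2 = 0 (m ≥ 1)
        have hpm : p = 2 ^ m := by omega
        have hpe : p % 2 = 0 := by
          rw [hpm, hpow]; omega
        have hq0 : p / 2 - 2 ^ (m - 1) = 0 := by omega
        rw [hz, hpe]
        simp only [if_neg (by omega : ¬ (0 : Nat) % 2 = 1)]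
        rw [collect]
        rw [show ((0:Nat) + 1) = 1 from rfl, collect_shift start (p / 2) 0]
        rw [ihq, hBL, hq0]
        rw [collect]
        have : start + 1 + ((m - 1 : Nat) : Int) = start + (m : Int) := by omega
        simp [this]
      · rw [collect_pos start (p - 2 ^ m) 0 (Nat.pos_of_ne_zero hz)]
        rw [hmod, hdiv]
        rw [collect_shift start (p / 2) 0, collect_shift start (p / 2 - 2 ^ (m - 1)) 0]
        rw [ihq, hBL]
        have : start + 1 + ((m - 1 : Nat) : Int) = start + (m : Int) := by omega
        rw [this]
        split <;> simp

theorem chooseLoopB_zero (start : Int) (res : List Int) : chooseLoopB start 0 res = res := by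
  rw [chooseLoopB]; rfl

theorem chooseLoopB_pos (start : Int) (p : Nat) (res : List Int) (hp : p ≠ 0) :
    chooseLoopB start p res =
      chooseLoopB start (p - 2 ^ (bitLen p - 1)) (res ++ [start + ((bitLen p - 1 : Nat) : Int)]) := by
  conv_lhs => rw [chooseLoopB]
  rw [if_neg hp]

theorem chooseLoopB_acc (start : Int) :
    ∀ (p : Nat) (res : List Int), chooseLoopB start p res = res ++ chooseLoopB start p [] := by
  intro p
  induction p using Nat.strong_induction_on with
  | _ p ih =>
    intro res
    by_cases hp : p = 0
    · subst hp; rw [chooseLoopB_zero, chooseLoopB_zero]; simp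
    · rw [chooseLoopB_pos start p res hp, chooseLoopB_pos start p [] hp]
      have hlt : p - 2 ^ (bitLen p - 1) < p :=
        Nat.sub_lt (Nat.pos_of_ne_zero hp) (Nat.two_pow_pos _)
      rw [ih _ hlt (res ++ [start + ((bitLen p - 1 : Nat) : Int)]),
          ih _ hlt ([] ++ [start + ((bitLen p - 1 : Nat) : Int)])]
      simp

theorem chooseLoopB_reverse_eq_collect (start : Int) :
    ∀ p : Nat, (chooseLoopB start p []).reverse = collect start p 0 := by
  intro p
  induction p using Nat.strong_induction_on with
  | _ p ih =>
    by_cases hp : p = 0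
    · subst hp; rw [chooseLoopB_zero, collect]; rfl
    · have hpos : 0 < p := Nat.pos_of_ne_zero hp
      have hlt : p - 2 ^ (bitLen p - 1) < p :=
        Nat.sub_lt hpos (Nat.two_pow_pos _)
      rw [chooseLoopB_pos start p [] hp]
      rw [chooseLoopB_acc, List.reverse_append, ih _ hlt]
      rw [collect_split start p hpos]
      simp

-- ===== VERDICT (by name: the statement is the Claim_ definition above) =====
theorem choose_hash_funcs_py_spec : Claim_equal_choose_hash_funcs_py := by
  intro start end_ pattern _ hpre
  unfold Spec_choose_hash_funcs_py choose_hash_funcs_py choose_hash_funcs_py_alt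
  match pattern with
  | none =>
    match end_ with
    | some e => rfl
    | none => exact absurd rfl (hpre.1 rfl)
  | some p =>
    simp only []
    rw [chooseLoopB_reverse_eq_collect]
    have := chooseLoopA_eq start p.toNat 0 []
    simpa using this
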